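-- pv_equiv track=rewrite | github.com/johentsch/moz | piece.py | appl
-- ===== SOURCE A (Python) =====
-- maj = ['I','II','III','IV','V','VI','VII']
--
-- min = ['i','ii','iii','iv','v','vi','vii']
--
-- shifts =    [[0,0,0,0,0,0,0],
--             [0,0,1,0,0,0,1],
--             [0,1,1,0,0,1,1],
--             [0,0,0,-1,0,0,0],
--             [0,0,0,0,0,0,1],
--             [0,0,1,0,0,1,1],
--             [0,1,1,0,1,1,1]]
--
-- def appl(n,k,global_minor=False):
--     """Returns the absolute key of an applied chord, given the local key.
--
--     Parameters
--     ----------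
--     n : str
--         The key that the chord is applied to.
--     k : str
--         The local key, i.e. the tonal context where the applied chord appears.
--     global_minor : bool
--         Has to be set to true if k is to be interpreted in a minor context.
--
--     Example
--     -------
--     If the label viio6/V appears in the context of the key of bVI,
--     viio6 pertains to the absolute key bIII.
--
--     >>> appl("V","bVI")
--     'bIII'
--
--     """
--
--     shift = n.count('#') - n.count('b') + k.count('#') - k.count('b')
--     for char in "#b":
--         n = n.replace(char,'')
--         k = k.replace(char,'')
--     steps = maj if n.isupper() else min
--     i = steps.index(n)
--     j = maj.index(k.upper())
--     step = steps[(i+j)%7]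
--     if k.islower() and i in [2,5,6]:
--         shift -= 1
--     if global_minor:
--         j = (j-2)%7
--     shift += shifts[i][j]
--     acc = shift * '#' if shift > 0 else -shift * 'b'
--     return acc+step
-- ===== SOURCE B (Python) =====
-- MAJ = ['I', 'II', 'III', 'IV', 'V', 'VI', 'VII']
-- MIN = [d.lower() for d in MAJ]
--
--
-- def _fifths(d, minor):
--     """Line-of-fifths position of scale degree d (0-based) in a major or
--     natural-minor scale: major degrees sit at 0,2,4,-1,1,3,5; minor at
--     0,2,-3,-1,1,-4,-2.  One formula covers both."""
--     b = 4 if minor else 1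
--     return (2 * d + b) % 7 - b
--
--
-- def appl(n, k, global_minor=False):
--     # single pass per string: count accidentals and strip them at once
--     shift = 0
--     nd = ''
--     for c in n:
--         if c == '#':
--             shift += 1
--         elif c == 'b':
--             shift -= 1
--         else:
--             nd += c
--     kd = ''
--     for c in k:
--         if c == '#':
--             shift += 1
--         elif c == 'b':
--             shift -= 1
--         else:
--             kd += c
--     steps = MAJ if nd.isupper() else MIN
--     i = steps.index(nd)
--     j = MAJ.index(kd.upper())
--     # net accidental of the resulting degree via line-of-fifths arithmetic
--     # (replaces the 7x7 table and the minor-context corrections)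
--     shift += (_fifths(i, kd.islower()) + _fifths(j, global_minor)
--               - _fifths((i + j) % 7, global_minor)) // 7
--     acc = '#' * shift if shift > 0 else 'b' * -shift
--     return acc + steps[(i + j) % 7]
-- ===== Notes on version B (the rewrite author's own statement) =====
-- stated objective: alternative
-- what changed: Replaces the precomputed 7x7 shifts table plus its minor-context correction and global-minor rotation by a single line-of-fifths formula ((2d+b)%7-b per degree, combined and floor-divided by 7), and strips/counts accidentals in one pass per string instead of count() plus repeated replace().
import Mathlib
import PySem

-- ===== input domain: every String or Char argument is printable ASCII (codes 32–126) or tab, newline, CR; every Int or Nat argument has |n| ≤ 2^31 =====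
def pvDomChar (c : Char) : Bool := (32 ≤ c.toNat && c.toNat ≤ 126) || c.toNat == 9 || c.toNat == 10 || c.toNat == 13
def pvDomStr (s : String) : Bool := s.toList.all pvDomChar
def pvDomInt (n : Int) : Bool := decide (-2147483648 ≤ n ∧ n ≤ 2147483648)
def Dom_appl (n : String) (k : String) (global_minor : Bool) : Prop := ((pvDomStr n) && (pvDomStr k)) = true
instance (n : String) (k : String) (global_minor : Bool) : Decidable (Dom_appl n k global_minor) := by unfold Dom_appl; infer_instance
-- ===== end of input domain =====

-- B replaces A's precomputed 7x7 `shifts` table (and its minor-context corrections) by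
-- line-of-fifths arithmetic and strips/counts accidentals in one pass per string (objective:
-- alternative decomposition, same cost).

-- shared helpers: the module constants and Python's str.isupper()/str.islower()
-- (at least one cased character and all cased characters upper/lower; exact on the ASCII domain)
def pvMaj : List String := ["I", "II", "III", "IV", "V", "VI", "VII"]
def pvMin : List String := ["i", "ii", "iii", "iv", "v", "vi", "vii"]
def pvIsupperS (s : String) : Bool :=
  s.toList.any PySem.Chars.isalpha &&
    s.toList.all (fun c => !PySem.Chars.isalpha c || PySem.Chars.isupper c)
def pvIslowerS (s : String) : Bool :=
  s.toList.any PySem.Chars.isalpha &&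
    s.toList.all (fun c => !PySem.Chars.isalpha c || PySem.Chars.islower c)
-- Python's `m * '#'` string repetition for m ≥ 0 (exact: m copies of the character)
def pvRepeat (m : Int) (c : Char) : String := String.ofList (List.replicate m.toNat c)

-- ===== PORT A =====
def pvShifts : List (List Int) :=
  [[0,0,0,0,0,0,0],
   [0,0,1,0,0,0,1],
   [0,1,1,0,0,1,1],
   [0,0,0,-1,0,0,0],
   [0,0,0,0,0,0,1],
   [0,0,1,0,0,1,1],
   [0,1,1,0,1,1,1]]

def appl (n : String) (k : String) (global_minor : Bool) : String :=
  let shift : Int := (PySem.Str.count n "#" : Int) - PySem.Str.count n "b"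
      + PySem.Str.count k "#" - PySem.Str.count k "b"
  -- for char in "#b": n = n.replace(char,''); k = k.replace(char,'')
  let n := PySem.Str.replace (PySem.Str.replace n "#" "") "b" ""
  let k := PySem.Str.replace (PySem.Str.replace k "#" "") "b" ""
  let steps := if pvIsupperS n then pvMaj else pvMin
  match PySem.List.index? steps n, PySem.List.index? pvMaj (PySem.Str.upper k) with
  | some i, some j =>
      let step := PySem.List.pyGetD steps (PySem.Int.mod ((i : Int) + j) 7) ""
      let shift := if pvIslowerS k && (i == 2 || i == 5 || i == 6) then shift - 1 else shift
      let j : Int := if global_minor then PySem.Int.mod ((j : Int) - 2) 7 else (j : Int)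
      let shift := shift + PySem.List.pyGetD (PySem.List.pyGetD pvShifts (i : Int) []) j 0
      let acc := if shift > 0 then pvRepeat shift '#' else pvRepeat (-shift) 'b'
      acc ++ step
  | _, _ => ""   -- steps.index(n) / maj.index(k.upper()) raises ValueError: excluded by Pre_appl

-- ===== PORT B =====
-- line-of-fifths position of scale degree d in a major / natural-minor scale
def pvFifths (d : Int) (minor : Bool) : Int :=
  let b : Int := if minor then 4 else 1
  PySem.Int.mod (2 * d + b) 7 - b

-- one pass over a string: accumulate the accidental count and the stripped degree
def pvScan (l : List Char) (st : Int × List Char) : Int × List Char :=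
  l.foldl (fun a c =>
    if c == '#' then (a.1 + 1, a.2)
    else if c == 'b' then (a.1 - 1, a.2)
    else (a.1, a.2 ++ [c])) st

def appl_alt (n : String) (k : String) (global_minor : Bool) : String :=
  let sn := pvScan n.toList (0, [])
  let sk := pvScan k.toList (sn.1, [])
  let nd := String.ofList sn.2
  let kd := String.ofList sk.2
  let steps := if pvIsupperS nd then pvMaj else pvMin
  match PySem.List.index? steps nd with
  | none => ""   -- .index raises ValueError: excluded by Pre_appl
  | some i =>
    match PySem.List.index? pvMaj (PySem.Str.upper kd) with
    | none => ""   -- .index raises ValueError: excluded by Pre_appl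
    | some j =>
        let shift := sk.1 + PySem.Int.floordiv
            (pvFifths i (pvIslowerS kd) + pvFifths j global_minor
              - pvFifths (PySem.Int.mod ((i : Int) + j) 7) global_minor) 7
        let acc := if shift > 0 then pvRepeat shift '#' else pvRepeat (-shift) 'b'
        acc ++ PySem.List.pyGetD steps (PySem.Int.mod ((i : Int) + j) 7) ""

-- ===== PRECONDITION & SPEC =====
-- Pre_appl: exactly the inputs where A's two list.index calls succeed (elsewhere A raises
-- ValueError): after stripping '#'/'b', n must be one of the roman numerals of its own case
-- list and k.upper() one of the major numerals.
def pvStrip (s : String) : String :=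
  String.ofList (s.toList.filter (fun c => !(c == '#') && !(c == 'b')))

def Pre_appl (n : String) (k : String) (global_minor : Bool) : Prop :=
  pvStrip n ∈ (if pvIsupperS (pvStrip n) then pvMaj else pvMin) ∧
    PySem.Str.upper (pvStrip k) ∈ pvMaj
instance (n : String) (k : String) (global_minor : Bool) : Decidable (Pre_appl n k global_minor) := by
  unfold Pre_appl; infer_instance

def pvWitness_appl : String × String × Bool := ("V", "bVI", false)

def Spec_appl (n : String) (k : String) (global_minor : Bool) (out : String) : Prop := out = appl_alt n k global_minor
instance (n : String) (k : String) (global_minor : Bool) (out : String) : Decidable (Spec_appl n k global_minor out) := by unfold Spec_appl; infer_instance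

-- ===== CLAIM (what is proved, stated in full; the proofs are below) =====
def Claim_equal_appl : Prop := ∀ (n : String) (k : String) (global_minor : Bool), Dom_appl n k global_minor → Pre_appl n k global_minor → Spec_appl n k global_minor (appl n k global_minor)

-- ===== LEMMAS AND PROOFS =====

-- Python s.replace(c, '') removes every occurrence of the single character c
theorem pv_replace_go_single (a : Char) (fuel : Nat) (l acc : List Char)
    (h : l.length ≤ fuel) :
    PySem.Chars.replace.go [a] [] fuel l acc = acc.reverse ++ l.filter (fun c => !(c == a)) := by
  induction fuel generalizing l acc with
  | zero =>
      have hl : l = [] := List.eq_nil_of_length_eq_zero (Nat.le_zero.mp h)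
      subst hl; simp [PySem.Chars.replace.go]
  | succ f ih =>
      cases l with
      | nil => simp [PySem.Chars.replace.go]
      | cons c t =>
          simp only [PySem.Chars.replace.go]
          by_cases hc : a = c
          · subst hc
            simp [List.isPrefixOf, ih t acc (by simpa using h)]
          · have : ([a].isPrefixOf (c :: t)) = false := by
              simp [List.isPrefixOf, hc]
            simp only [this]
            rw [ih t (c :: acc) (by simpa using Nat.le_of_succ_le_succ h)]
            simp [Ne.symm hc]

theorem pv_replace_single (l : List Char) (a : Char) :
    PySem.Chars.replace l [a] [] = l.filter (fun c => !(c == a)) := by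
  simp [PySem.Chars.replace, pv_replace_go_single a l.length l [] le_rfl]

theorem pv_count_go_single (a : Char) (fuel : Nat) (l : List Char) (acc : Nat)
    (h : l.length ≤ fuel) :
    PySem.Chars.count.go [a] fuel l acc = acc + l.count a := by
  induction fuel generalizing l acc with
  | zero =>
      have hl : l = [] := List.eq_nil_of_length_eq_zero (Nat.le_zero.mp h)
      subst hl; simp [PySem.Chars.count.go]
  | succ f ih =>
      cases l with
      | nil => simp [PySem.Chars.count.go]
      | cons c t =>
          simp only [PySem.Chars.count.go]
          by_cases hc : a = c
          · subst hc
            simp [List.isPrefixOf, ih t (acc + 1) (by simpa using h)]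
            omega
          · have : ([a].isPrefixOf (c :: t)) = false := by
              simp [List.isPrefixOf, hc]
            simp only [this]
            rw [ih t acc (by simpa using Nat.le_of_succ_le_succ h)]
            simp [Ne.symm hc]

theorem pv_count_single (l : List Char) (a : Char) :
    PySem.Chars.count l [a] = l.count a := by
  simp [PySem.Chars.count, pv_count_go_single a l.length l 0 le_rfl]

-- B's single pass computes the accidental count and the stripped string
theorem pv_scan_eq (l : List Char) (s : Int) (acc : List Char) :
    pvScan l (s, acc) =
      (s + (l.count '#' : Int) - (l.count 'b' : Int),
        acc ++ l.filter (fun c => !(c == '#') && !(c == 'b'))) := by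
  induction l generalizing s acc with
  | nil => simp [pvScan]
  | cons c t ih =>
      simp only [pvScan, List.foldl_cons] at *
      by_cases h1 : c = '#'
      · subst h1; rw [ih]; simp; ring
      · by_cases h2 : c = 'b'
        · subst h2; rw [ih]; simp; ring
        · rw [if_neg (by simpa using h1), if_neg (by simpa using h2), ih]
          simp [h1, h2]

-- the heart: A's table lookup + corrections = B's line-of-fifths formula, on all 7·7·2·2 cases
theorem pv_core (i j : Fin 7) (kl gm : Bool) :
    (if kl && ((i : Nat) == 2 || (i : Nat) == 5 || (i : Nat) == 6) then (-1 : Int) else 0)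
      + PySem.List.pyGetD (PySem.List.pyGetD pvShifts ((i : Nat) : Int) [])
          (if gm then PySem.Int.mod (((j : Nat) : Int) - 2) 7 else ((j : Nat) : Int)) 0
    = PySem.Int.floordiv
        (pvFifths ((i : Nat) : Int) kl + pvFifths ((j : Nat) : Int) gm
          - pvFifths (PySem.Int.mod (((i : Nat) : Int) + ((j : Nat) : Int)) 7) gm) 7 := by
  revert kl gm; revert i j; decide

-- A's double replace strips exactly the accidentals
theorem pv_strip_replace (s : String) :
    PySem.Str.replace (PySem.Str.replace s "#" "") "b" "" = pvStrip s := by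
  apply String.toList_inj.mp
  simp [pvStrip, pv_replace_single, List.filter_filter, Bool.and_comm]

theorem pv_count_sharp (s : String) : PySem.Str.count s "#" = s.toList.count '#' := by
  have : ("#" : String).toList = ['#'] := by decide
  simp [this, pv_count_single]

theorem pv_count_flat (s : String) : PySem.Str.count s "b" = s.toList.count 'b' := by
  have : ("b" : String).toList = ['b'] := by decide
  simp [this, pv_count_single]

-- B's pass over one whole string, phrased through pvStrip
theorem pv_scan_str (s : String) (t : Int) :
    pvScan s.toList (t, []) =
      (t + (s.toList.count '#' : Int) - (s.toList.count 'b' : Int), (pvStrip s).toList) := by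
  simp [pv_scan_eq, pvStrip, String.toList_ofList]

-- the ports agree on every input (both return "" where Python raises ValueError)
set_option maxHeartbeats 1600000 in
theorem pv_appl_eq (n k : String) (gm : Bool) : appl n k gm = appl_alt n k gm := by
  simp only [appl, appl_alt, pv_scan_str, pv_strip_replace, String.ofList_toList,
    pv_count_sharp, pv_count_flat]
  generalize h1 : PySem.List.index? (if pvIsupperS (pvStrip n) = true then pvMaj else pvMin) (pvStrip n) = o1
  generalize h2 : PySem.List.index? pvMaj (PySem.Str.upper (pvStrip k)) = o2
  cases o1 with
  | none => cases o2 <;> rfl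
  | some i =>
      cases o2 with
      | none => rfl
      | some j =>
          dsimp only
          obtain ⟨hi, -, -⟩ := PySem.List.getElem_of_index?_eq_some h1
          obtain ⟨hj, -, -⟩ := PySem.List.getElem_of_index?_eq_some h2
          have hi7 : i < 7 := by
            rcases hif : pvIsupperS (pvStrip n) with _ | _ <;> simp [hif, pvMaj, pvMin] at hi <;> omega
          have hj7 : j < 7 := by simp [pvMaj] at hj; omega
          have hcore := pv_core ⟨i, hi7⟩ ⟨j, hj7⟩ (pvIslowerS (pvStrip k)) gm
          have hshift :
              (if (pvIslowerS (pvStrip k) && (i == 2 || i == 5 || i == 6)) = true then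
                  ((n.toList.count '#' : Int) - (n.toList.count 'b' : Int)
                    + (k.toList.count '#' : Int) - (k.toList.count 'b' : Int)) - 1
                else
                  ((n.toList.count '#' : Int) - (n.toList.count 'b' : Int)
                    + (k.toList.count '#' : Int) - (k.toList.count 'b' : Int)))
                + PySem.List.pyGetD (PySem.List.pyGetD pvShifts (i : Int) [])
                    (if gm then PySem.Int.mod ((j : Int) - 2) 7 else (j : Int)) 0
              = (0 + (n.toList.count '#' : Int) - (n.toList.count 'b' : Int)
                  + (k.toList.count '#' : Int) - (k.toList.count 'b' : Int))
                + PySem.Int.floordiv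
                    (pvFifths (i : Int) (pvIslowerS (pvStrip k)) + pvFifths (j : Int) gm
                      - pvFifths (PySem.Int.mod ((i : Int) + (j : Int)) 7) gm) 7 := by
            rw [← hcore]; split_ifs <;> ring
          rw [hshift]

-- ===== VERDICT (by name: the statement is the Claim_ definition above) =====
theorem appl_spec : Claim_equal_appl := by
  intro n k gm _ _
  unfold Spec_appl
  exact pv_appl_eq n k gm
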